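-- pv_equiv track=rewrite | github.com/ndelval/bim-multi-agent-orchestrator | orchestrator/memory/providers/hybrid_provider.py | _sanitize_match_query
-- ===== SOURCE A (Python) =====
-- def _sanitize_match_query(query: str) -> str:
--     if not query:
--         return "*"
--     cleaned = query.replace('"', ' ')
--     for ch in "?.,;:!()[]{}<>|/\\":
--         cleaned = cleaned.replace(ch, " ")
--     cleaned = " ".join(cleaned.split())
--     return cleaned or "*"
-- ===== SOURCE B (Python) =====
-- PUNCT = frozenset('"?.,;:!()[]{}<>|/\\')
--
--
-- def _sanitize_match_query(query: str) -> str: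
--     if not query:
--         return "*"
--     out = []
--     in_word = False
--     for ch in query:
--         if ch in PUNCT or ch.isspace():
--             in_word = False
--         else:
--             if not in_word and out:
--                 out.append(" ")
--             out.append(ch)
--             in_word = True
--     return "".join(out) or "*"
-- ===== Notes on version B (the rewrite author's own statement) =====
-- stated objective: alternative
-- what changed: Replaces the chain of ~19 full-string str.replace scans followed by split/join with a single streaming pass holding an (output, in-word) accumulator that drops separators and inserts single spaces between words directly, never materialising intermediate strings or a word list.
import Mathlib
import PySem

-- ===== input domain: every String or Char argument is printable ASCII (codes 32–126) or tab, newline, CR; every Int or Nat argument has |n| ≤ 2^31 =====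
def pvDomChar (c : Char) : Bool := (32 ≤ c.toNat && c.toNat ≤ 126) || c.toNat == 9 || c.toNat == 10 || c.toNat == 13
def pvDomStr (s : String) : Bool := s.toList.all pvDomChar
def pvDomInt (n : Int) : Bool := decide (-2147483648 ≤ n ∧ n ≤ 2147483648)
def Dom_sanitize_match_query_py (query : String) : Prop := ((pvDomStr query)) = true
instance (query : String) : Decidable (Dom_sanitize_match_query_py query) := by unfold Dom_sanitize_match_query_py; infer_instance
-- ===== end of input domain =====

-- B replaces A's chain of per-punctuation-character full-string replace scans plus split/join
-- with ONE streaming pass that drops separators and inserts single spaces between words directly.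

-- ===== PORT A =====
-- the characters of the Python loop string "?.,;:!()[]{}<>|/\\"
def pvPunctLoop : List Char := "?.,;:!()[]{}<>|/\\".toList

def sanitize_match_query_py (query : String) : String :=
  if query = "" then "*"
  else
    let cleaned := PySem.Str.replace query "\"" " "
    let cleaned := pvPunctLoop.foldl
      (fun cl ch => PySem.Str.replace cl (String.singleton ch) " ") cleaned
    let cleaned := PySem.Str.join " " (PySem.Str.split₀ cleaned)
    if cleaned = "" then "*" else cleaned

-- ===== PORT B =====
-- PUNCT = frozenset('"?.,;:!()[]{}<>|/\\')
def pvPunctSet : PySem.Set Char := PySem.Set.ofList ("\"?.,;:!()[]{}<>|/\\".toList)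

-- 'ch in PUNCT or ch.isspace()'
def pvSepB (c : Char) : Bool := decide (c ∈ pvPunctSet) || PySem.Chars.isspace c

-- one iteration of B's loop: state = (out, in_word)
def pvStepB (st : List Char × Bool) (ch : Char) : List Char × Bool :=
  if pvSepB ch then (st.1, false)
  else ((if !st.2 && !st.1.isEmpty then st.1 ++ [' '] else st.1) ++ [ch], true)

def sanitize_match_query_py_alt (query : String) : String :=
  if query = "" then "*"
  else
    let st := query.toList.foldl pvStepB ([], false)
    let result := String.ofList st.1
    if result = "" then "*" else result

-- ===== PRECONDITION & SPEC =====
def Spec_sanitize_match_query_py (query : String) (out : String) : Prop := out = sanitize_match_query_py_alt query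
instance (query : String) (out : String) : Decidable (Spec_sanitize_match_query_py query out) := by unfold Spec_sanitize_match_query_py; infer_instance

-- ===== CLAIM (what is proved, stated in full; the proofs are below) =====
def Claim_equal_sanitize_match_query_py : Prop := ∀ (query : String), Dom_sanitize_match_query_py query → Spec_sanitize_match_query_py query (sanitize_match_query_py query)

-- ===== LEMMAS AND PROOFS =====

-- replace.go with a single-character pattern is a pointwise map
lemma pv_go_one (a b : Char) : ∀ (fuel : Nat) (l acc : List Char), l.length ≤ fuel →
    PySem.Chars.replace.go [a] [b] fuel l acc
      = acc.reverse ++ l.map (fun c => if a = c then b else c) := by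
  intro fuel
  induction fuel with
  | zero => intro l acc h; simp at h; subst h; simp [PySem.Chars.replace.go]
  | succ n ih =>
    intro l acc h
    cases l with
    | nil => simp [PySem.Chars.replace.go]
    | cons c t =>
      rw [PySem.Chars.replace.go]
      by_cases hac : a = c
      · subst hac
        simp only [List.isPrefixOf, BEq.rfl]
        simp [ih t (b :: acc) (by simpa using Nat.le_of_succ_le_succ h)]
      · simp [List.isPrefixOf, hac, ih t (c :: acc) (by simpa using Nat.le_of_succ_le_succ h)]

-- single-character str.replace is List.map
lemma pv_replace_one (a b : Char) (cs : List Char) :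
    PySem.Chars.replace cs [a] [b] = cs.map (fun c => if a = c then b else c) := by
  simp [PySem.Chars.replace, pv_go_one a b cs.length cs [] le_rfl]

-- composing one more single-character replacement extends the membership map
lemma pv_comp_step (a : Char) (L : List Char) (h : ' ' ∉ L) (c : Char) :
    (if (if a = c then ' ' else c) ∈ L then ' ' else (if a = c then ' ' else c))
      = if c ∈ a :: L then ' ' else c := by
  by_cases hac : a = c
  · subst hac; simp [h]
  · simp [hac, Ne.symm hac]

-- A's replace loop, executed over any character list L avoiding ' ', is one membership map
lemma pv_loop_toList : ∀ (L : List Char) (s : String), ' ' ∉ L →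
    (L.foldl (fun cl ch => PySem.Str.replace cl (String.singleton ch) " ") s).toList
      = s.toList.map (fun c => if c ∈ L then ' ' else c) := by
  intro L
  induction L with
  | nil => intro s _; simp
  | cons a L ih =>
    intro s h
    have hL : ' ' ∉ L := fun hm => h (List.mem_cons_of_mem _ hm)
    simp only [List.foldl_cons]
    rw [ih _ hL, PySem.Str.toList_replace]
    have h1 : (String.singleton a).toList = [a] := by simp
    have h2 : (" " : String).toList = [' '] := by decide
    rw [h1, h2, pv_replace_one, List.map_map]
    apply List.map_congr_left
    intro c _
    exact pv_comp_step a L hL c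

-- A's mapping: '"' and the loop characters become spaces
def pvMapA (c : Char) : Char := if c ∈ '"' :: pvPunctLoop then ' ' else c

-- join with a single space, word appended at the back
lemma pv_join_snoc (ws : List (List Char)) (w : List Char) :
    PySem.Chars.join [' '] (ws ++ [w])
      = if ws.isEmpty then w else PySem.Chars.join [' '] ws ++ ' ' :: w := by
  induction ws with
  | nil => simp [PySem.Chars.join, List.intercalate]
  | cons a t ih =>
    cases t with
    | nil => simp [PySem.Chars.join, List.intercalate]
    | cons b t' =>
      show PySem.Chars.join [' '] (a :: b :: (t' ++ [w])) = _
      rw [PySem.Chars.join_cons_cons, ← List.cons_append, ih,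
          PySem.Chars.join_cons_cons]
      simp

-- a join of nonempty words over a nonempty list is nonempty
lemma pv_join_ne_nil (ws : List (List Char)) (hne : ws ≠ [])
    (hw : ∀ w ∈ ws, w ≠ []) : PySem.Chars.join [' '] ws ≠ [] := by
  cases ws with
  | nil => exact absurd rfl hne
  | cons a t =>
    have ha : a ≠ [] := hw a (List.mem_cons_self)
    cases t with
    | nil => simpa [PySem.Chars.join_singleton] using ha
    | cons b t' =>
      rw [PySem.Chars.join_cons_cons]
      cases a with
      | nil => exact absurd rfl ha
      | cons x xs => simp

-- the pending output string corresponding to split₀.go's state (cur, acc)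
def pvOutOf (cur : List Char) (acc : List (List Char)) : List Char :=
  if cur.isEmpty then PySem.Chars.join [' '] acc.reverse
  else PySem.Chars.join [' '] (acc.reverse ++ [cur.reverse])

-- whitespace variant of B's step (what B's step does after A's punctuation mapping)
def pvStepWs (st : List Char × Bool) (c : Char) : List Char × Bool :=
  if PySem.Chars.isspace c then (st.1, false)
  else ((if !st.2 && !st.1.isEmpty then st.1 ++ [' '] else st.1) ++ [c], true)

-- core simulation: split-then-join equals the streaming fold, for every reachable state
lemma pv_key : ∀ (l cur : List Char) (acc : List (List Char)), (∀ w ∈ acc, w ≠ []) →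
    PySem.Chars.join [' '] (PySem.Chars.split₀.go l cur acc)
      = (l.foldl pvStepWs (pvOutOf cur acc, !cur.isEmpty)).1 := by
  intro l
  induction l with
  | nil =>
    intro cur acc _
    by_cases hc : cur = []
    · simp [PySem.Chars.split₀.go, pvOutOf, hc]
    · simp [PySem.Chars.split₀.go, pvOutOf, hc, List.isEmpty_iff]
  | cons c rest ih =>
    intro cur acc hacc
    rw [PySem.Chars.split₀.go]
    by_cases hsp : PySem.Chars.isspace c = true
    · rw [if_pos hsp]
      by_cases hc : cur = []
      · subst hc
        rw [if_pos List.isEmpty_nil]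
        rw [ih [] acc hacc]
        simp [List.foldl_cons, pvStepWs, hsp]
      · have hce : cur.isEmpty = false := by simp [hc]
        rw [hce, if_neg Bool.false_ne_true]
        rw [ih [] (cur.reverse :: acc)
              (by intro w hw; rcases List.mem_cons.mp hw with h | h
                  · subst h; simpa using hc
                  · exact hacc w h)]
        have hout : pvOutOf [] (cur.reverse :: acc) = pvOutOf cur acc := by
          simp [pvOutOf, hc, List.isEmpty_iff]
        rw [hout]
        simp [List.foldl_cons, pvStepWs, hsp]
    · have hsp' : PySem.Chars.isspace c = false := by
        cases h : PySem.Chars.isspace c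
        · rfl
        · exact absurd h hsp
      rw [hsp', if_neg Bool.false_ne_true]
      rw [ih (c :: cur) acc hacc]
      have hout : pvOutOf (c :: cur) acc
          = (pvStepWs (pvOutOf cur acc, !cur.isEmpty) c).1 := by
        by_cases hc : cur = []
        · subst hc
          by_cases ha : acc = []
          · simp [pvOutOf, pvStepWs, hsp', ha, PySem.Chars.join_singleton]
          · have hne : PySem.Chars.join [' '] acc.reverse ≠ [] := by
              apply pv_join_ne_nil
              · simpa using ha
              · intro w hw; exact hacc w (List.mem_reverse.mp hw)
            simp only [pvOutOf, pvStepWs, hsp', List.isEmpty_cons,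
              List.isEmpty_nil, if_true, List.reverse_cons, List.reverse_nil,
              List.nil_append]
            rw [pv_join_snoc]
            have hra : acc.reverse.isEmpty = false := by
              simp [ha]
            simp [hra, hne]
        · simp only [pvOutOf, pvStepWs, hsp', List.isEmpty_cons,
            List.isEmpty_iff, hc, List.reverse_cons]
          have h1 : (!decide (cur = [])) = true := by simp [hc]
          rw [pv_join_snoc, pv_join_snoc]
          by_cases ha : acc = []
          · simp [ha]
          · have hra : acc.reverse.isEmpty = false := by
              simp [ha]
            simp [hra, hc, List.append_assoc]
      have hin : (pvStepWs (pvOutOf cur acc, !cur.isEmpty) c).2 = true := by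
        simp [pvStepWs, hsp']
      rw [hout, List.foldl_cons]
      have h2 : (!(c :: cur).isEmpty) = (pvStepWs (pvOutOf cur acc, !cur.isEmpty) c).2 := by
        rw [hin]; simp
      rw [h2, Prod.mk.eta]

-- B's step on c agrees with the whitespace step on A's mapped character
lemma pv_step_eq (st : List Char × Bool) (c : Char) :
    pvStepWs st (pvMapA c) = pvStepB st c := by
  have hmem : decide (c ∈ pvPunctSet) = decide (c ∈ '"' :: pvPunctLoop) := by
    have : (c ∈ pvPunctSet) ↔ c ∈ ('"' :: pvPunctLoop) := by
      rw [pvPunctSet, PySem.Set.mem_ofList]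
      have hl : ("\"?.,;:!()[]{}<>|/\\".toList) = '"' :: pvPunctLoop := by decide
      rw [hl]
    simp [this]
  by_cases hp : c ∈ '"' :: pvPunctLoop
  · have : PySem.Chars.isspace ' ' = true := by decide
    simp [pvMapA, hp, pvStepWs, pvStepB, pvSepB, this, hmem]
  · simp [pvMapA, hp, pvStepWs, pvStepB, pvSepB, hmem]

-- ===== VERDICT (by name: the statement is the Claim_ definition above) =====
theorem sanitize_match_query_py_spec : Claim_equal_sanitize_match_query_py := by
  intro query _
  unfold Spec_sanitize_match_query_py sanitize_match_query_py sanitize_match_query_py_alt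
  by_cases hq : query = ""
  · simp [hq]
  · simp only [if_neg hq]
    have hsp : ' ' ∉ pvPunctLoop := by decide
    have hmap :
        (pvPunctLoop.foldl (fun cl ch => PySem.Str.replace cl (String.singleton ch) " ")
            (PySem.Str.replace query "\"" " ")).toList
          = query.toList.map pvMapA := by
      rw [pv_loop_toList _ _ hsp, PySem.Str.toList_replace]
      have h1 : ("\"" : String).toList = ['"'] := by decide
      have h2 : (" " : String).toList = [' '] := by decide
      rw [h1, h2, pv_replace_one, List.map_map]
      apply List.map_congr_left
      intro c _
      simp only [Function.comp]
      rw [pv_comp_step '"' pvPunctLoop hsp c]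
      rfl
    have hjoin :
        PySem.Str.join " " (PySem.Str.split₀
          (pvPunctLoop.foldl (fun cl ch => PySem.Str.replace cl (String.singleton ch) " ")
            (PySem.Str.replace query "\"" " ")))
          = String.ofList (query.toList.foldl pvStepB ([], false)).1 := by
      apply String.toList_inj.mp
      rw [PySem.Str.toList_join]
      have hsep : (" " : String).toList = [' '] := by decide
      rw [hsep, PySem.Str.split₀_map_toList, hmap]
      rw [PySem.Chars.split₀]
      rw [pv_key (query.toList.map pvMapA) [] [] (by intro w hw; simp at hw)]
      rw [List.foldl_map]
      have : (fun (st : List Char × Bool) c => pvStepWs st (pvMapA c)) = pvStepB := by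
        funext st c; exact pv_step_eq st c
      rw [this]
      simp [pvOutOf]
    rw [hjoin]
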